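-- pv_equiv track=rewrite | github.com/random2907/Game-of-life | src/game_of_life/util.py | simple_rle_decode
-- ===== SOURCE A (Python) =====
-- def simple_rle_decode(rle: str):
--     lines = rle.strip().splitlines()
--     pattern_lines = [line for line in lines if not line.startswith('#') and not line.startswith('x')]
--     pattern = ''.join(pattern_lines).replace('\n', '').replace('!', '')
--
--     x = y = 0
--     num = ''
--     live_cells = set()
--
--     for char in pattern:
--         if char.isdigit():
--             num += char
--         elif char in 'bo':
--             count = int(num) if num else 1
--             if char == 'o':
--                 for i in range(count):
--                     live_cells.add((x + i, y))
--             x += count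
--             num = ''
--         elif char == '$':
--             count = int(num) if num else 1
--             y += count
--             x = 0
--             num = ''
--     return live_cells
-- ===== SOURCE B (Python) =====
-- def simple_rle_decode(rle: str):
--     lines = rle.strip().splitlines()
--     pattern_lines = [line for line in lines if not line.startswith('#') and not line.startswith('x')]
--     pattern = ''.join(pattern_lines).replace('\n', '').replace('!', '')
--
--     # Phase 1: drop stray characters (they are no-ops in the RLE grammar; digits
--     # accumulate across them, so deleting them first is exact), then tokenize
--     # into (digit-string, symbol) pairs; a trailing digit run with no symbol is dropped.
--     cleaned = [c for c in pattern if c.isdigit() or c in 'bo$']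
--     tokens = []
--     i, n = 0, len(cleaned)
--     while i < n:
--         j = i
--         while j < n and cleaned[j].isdigit():
--             j += 1
--         if j == n:
--             break
--         tokens.append((''.join(cleaned[i:j]), cleaned[j]))
--         i = j + 1
--
--     # Phase 2: interpret the token stream.
--     x = y = 0
--     cells = set()
--     for ds, sym in tokens:
--         count = int(ds) if ds else 1
--         if sym == '$':
--             y += count
--             x = 0
--         else:
--             if sym == 'o':
--                 cells.update((x + k, y) for k in range(count))
--             x += count
--     return cells
-- ===== Notes on version B (the rewrite author's own statement) =====
-- stated objective: alternative
-- what changed: A decodes with a single character-level state machine carrying a pending digit-string accumulator; B first deletes stray characters, tokenizes the stream into (count,symbol) pairs in one scan, and then interprets the token list in a second pass with no pending-digit state.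
import Mathlib
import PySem

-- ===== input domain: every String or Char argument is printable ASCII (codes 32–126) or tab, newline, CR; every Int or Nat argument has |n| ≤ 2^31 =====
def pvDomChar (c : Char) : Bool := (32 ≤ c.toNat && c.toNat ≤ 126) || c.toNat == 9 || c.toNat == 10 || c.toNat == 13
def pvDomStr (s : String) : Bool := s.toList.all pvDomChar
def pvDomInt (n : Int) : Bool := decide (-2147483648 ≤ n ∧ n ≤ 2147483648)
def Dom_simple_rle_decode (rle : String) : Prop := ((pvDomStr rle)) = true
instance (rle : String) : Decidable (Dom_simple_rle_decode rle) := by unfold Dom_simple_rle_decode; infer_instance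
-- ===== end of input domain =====

-- B tokenizes the RLE stream into (count,symbol) pairs and interprets the token list,
-- instead of A's character state machine; equivalence of the two decoders is proved below.

-- ===== PORT A =====
-- shared preprocessing: both Pythons begin with exactly these lines
def pvPattern (rle : String) : List Char :=
  let lines := PySem.Chars.splitlines (PySem.Chars.strip rle.toList)
  let patternLines := lines.filter
    (fun line => !(PySem.Chars.startswith line ['#']) && !(PySem.Chars.startswith line ['x']))
  PySem.Chars.replace (PySem.Chars.replace (PySem.Chars.join [] patternLines) ['\n'] []) ['!'] []

-- one iteration of A's for-loop over (x, y, num, live_cells)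
def pvAStep (x y : Int) (num : List Char) (cells : PySem.Set (Int × Int)) (c : Char) :
    Int × Int × List Char × PySem.Set (Int × Int) :=
  if PySem.Chars.isdigit c then (x, y, num ++ [c], cells)
  else if c = 'b' ∨ c = 'o' then
    -- `int(num) if num else 1`: exact, since num is empty (ofChars? none → 1) or all ASCII digits
    let count : Int := (PySem.Int.ofChars? num).getD 1
    let cells' := if c = 'o' then
        (PySem.List.pyRange 0 count 1).foldl (fun s i => PySem.Set.add s (x + i, y)) cells
      else cells
    (x + count, y, [], cells')
  else if c = '$' then
    let count : Int := (PySem.Int.ofChars? num).getD 1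
    (0, y + count, [], cells)
  else (x, y, num, cells)

def simple_rle_decode (rle : String) : List (Int × Int) :=
  ((pvPattern rle).foldl
    (fun st c => pvAStep st.1 st.2.1 st.2.2.1 st.2.2.2 c)
    (0, 0, ([] : List Char), (PySem.Set.empty : PySem.Set (Int × Int)))).2.2.2

-- ===== PORT B =====
def pvRelevant (c : Char) : Bool :=
  PySem.Chars.isdigit c || c = 'b' || c = 'o' || c = '$'

-- B's while-loop tokenizer: scan a digit run, emit (digits, symbol); trailing digits are dropped
def pvTokenize (s : List Char) : List (List Char × Char) :=
  match h : s.dropWhile PySem.Chars.isdigit with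
  | [] => []
  | c :: rest => (s.takeWhile PySem.Chars.isdigit, c) :: pvTokenize rest
termination_by s.length
decreasing_by
  have hle := List.length_dropWhile_le PySem.Chars.isdigit s
  rw [h] at hle; simp at hle; omega

-- one iteration of B's for-loop over the token list, state (x, y, cells)
def pvBStep (x y : Int) (cells : PySem.Set (Int × Int)) (t : List Char × Char) :
    Int × Int × PySem.Set (Int × Int) :=
  -- `int(ds) if ds else 1`: exact, ds is a nonempty all-digit run in the else branch
  let count : Int := if t.1.isEmpty then 1 else (PySem.Int.ofChars? t.1).getD 1
  if t.2 = '$' then (0, y + count, cells)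
  else
    let cells' := if t.2 = 'o' then
        (PySem.List.pyRange 0 count 1).foldl (fun s k => PySem.Set.add s (x + k, y)) cells
      else cells
    (x + count, y, cells')

def simple_rle_decode_alt (rle : String) : List (Int × Int) :=
  let cleaned := (pvPattern rle).filter pvRelevant
  ((pvTokenize cleaned).foldl
    (fun st t => pvBStep st.1 st.2.1 st.2.2 t)
    (0, 0, (PySem.Set.empty : PySem.Set (Int × Int)))).2.2

-- ===== PRECONDITION & SPEC =====
def Spec_simple_rle_decode (rle : String) (out : List (Int × Int)) : Prop := out = simple_rle_decode_alt rle
instance (rle : String) (out : List (Int × Int)) : Decidable (Spec_simple_rle_decode rle out) := by unfold Spec_simple_rle_decode; infer_instance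

-- ===== CLAIM (what is proved, stated in full; the proofs are below) =====
def Claim_equal_simple_rle_decode : Prop := ∀ (rle : String), Dom_simple_rle_decode rle → Spec_simple_rle_decode rle (simple_rle_decode rle)

-- ===== LEMMAS AND PROOFS =====
lemma pvCount_eq (num : List Char) :
    (if num = [] then (1 : Int) else (PySem.Int.ofChars? num).getD 1)
      = (PySem.Int.ofChars? num).getD 1 := by
  cases num with
  | nil => decide
  | cons a l => simp

lemma pvTokenize_all_digits (ds : List Char) (h : ∀ c ∈ ds, PySem.Chars.isdigit c = true) :
    pvTokenize ds = [] := by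
  rw [pvTokenize]
  split
  · rfl
  · rename_i c rest heq
    rw [List.dropWhile_eq_nil_iff.mpr h] at heq
    cases heq

lemma pvTokenize_run (ds : List Char) (c : Char) (r : List Char)
    (h : ∀ d ∈ ds, PySem.Chars.isdigit d = true) (hc : PySem.Chars.isdigit c = false) :
    pvTokenize (ds ++ c :: r) = (ds, c) :: pvTokenize r := by
  have htake : (ds ++ c :: r).takeWhile PySem.Chars.isdigit = ds := by
    rw [List.takeWhile_append]
    simp [List.takeWhile_eq_self_iff.mpr h, hc]
  have hdrop : (ds ++ c :: r).dropWhile PySem.Chars.isdigit = c :: r := by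
    rw [List.dropWhile_append]
    simp [List.dropWhile_eq_nil_iff.mpr h, hc]
  rw [pvTokenize]
  split
  · rename_i heq
    rw [hdrop] at heq
    cases heq
  · rename_i c1 rest1 heq
    rw [hdrop] at heq
    injection heq with h1 h2
    subst h1; subst h2
    rw [htake]

-- loop correspondence: A's state machine on l with pending digits `num` equals
-- B's interpreter on the tokenization of `num ++ (relevant chars of l)`
lemma pvLoop_eq (l : List Char) (x y : Int) (num : List Char)
    (cells : PySem.Set (Int × Int)) (hnum : ∀ c ∈ num, PySem.Chars.isdigit c = true) :
    (let a := l.foldl (fun st c => pvAStep st.1 st.2.1 st.2.2.1 st.2.2.2 c) (x, y, num, cells)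
     (a.1, a.2.1, a.2.2.2))
    = (pvTokenize (num ++ l.filter pvRelevant)).foldl
        (fun st t => pvBStep st.1 st.2.1 st.2.2 t) (x, y, cells) := by
  induction l generalizing x y num cells with
  | nil => simp [pvTokenize_all_digits num hnum]
  | cons c t ih =>
    by_cases hd : PySem.Chars.isdigit c = true
    · have hrel : pvRelevant c = true := by simp [pvRelevant, hd]
      have hnum' : ∀ d ∈ num ++ [c], PySem.Chars.isdigit d = true := by
        intro d hdm; rcases List.mem_append.mp hdm with h1 | h1
        · exact hnum d h1
        · simp at h1; subst h1; exact hd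
      simp only [List.foldl_cons, List.filter_cons, hrel, if_pos]
      have := ih x y (num ++ [c]) cells hnum'
      simpa [pvAStep, hd] using this
    · have hd' : PySem.Chars.isdigit c = false := by simpa using hd
      by_cases hbo : c = 'b' ∨ c = 'o'
      · have hrel : pvRelevant c = true := by
          rcases hbo with h | h <;> simp [pvRelevant, h]
        have hne : ¬ c = '$' := by rcases hbo with h | h <;> (subst h; decide)
        simp only [List.foldl_cons, List.filter_cons, hrel, if_pos]
        rw [pvTokenize_run num c (t.filter pvRelevant) hnum hd']
        rw [List.foldl_cons]
        have hcnt := pvCount_eq num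
        have := ih (x + (PySem.Int.ofChars? num).getD 1) y [] (if c = 'o' then
            (PySem.List.pyRange 0 ((PySem.Int.ofChars? num).getD 1) 1).foldl
              (fun s i => PySem.Set.add s (x + i, y)) cells else cells) (by simp)
        simpa [pvAStep, pvBStep, hd', hbo, hne, hcnt] using this
      · by_cases hdl : c = '$'
        · subst hdl
          have hrel : pvRelevant '$' = true := by decide
          simp only [List.foldl_cons, List.filter_cons, hrel, if_pos]
          rw [pvTokenize_run num '$' (t.filter pvRelevant) hnum (by decide)]
          rw [List.foldl_cons]
          have hcnt := pvCount_eq num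
          have := ih 0 (y + (PySem.Int.ofChars? num).getD 1) [] cells (by simp)
          simpa [pvAStep, pvBStep, hd', hbo, hcnt] using this
        · have hrel : pvRelevant c = false := by
            have hb : c ≠ 'b' := fun h => hbo (Or.inl h)
            have ho : c ≠ 'o' := fun h => hbo (Or.inr h)
            simp [pvRelevant, hd', hb, ho, hdl]
          simp only [List.foldl_cons, List.filter_cons, hrel]
          have := ih x y num cells hnum
          simpa [pvAStep, hd', hbo, hdl] using this

-- ===== VERDICT (by name: the statement is the Claim_ definition above) =====
theorem simple_rle_decode_spec : Claim_equal_simple_rle_decode := by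
  intro rle _
  unfold Spec_simple_rle_decode simple_rle_decode simple_rle_decode_alt
  have := pvLoop_eq (pvPattern rle) 0 0 [] PySem.Set.empty (by simp)
  simpa using congrArg (fun st => st.2.2) this
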